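-- pv_equiv track=rewrite | github.com/sai9raman/PolynomialDifferentiation | PolyDifferentation.py | checkPolynomial
-- ===== SOURCE A (Python) =====
-- def checkPolynomial(poly):
--
--     """
--     A Function to check the appropriateness the user input of a one variable polynomial
--
--     Input: Polynomial String
--     Output: Boolean-  True if polynomial is appropriate
--     """
--
--     allowedChars = [" ","*","+","-","/","x","^"]
--
--     for elem in poly:
--         if elem in allowedChars or elem.isdigit()==True:
--             continue
--         else:
--             return False
--
--     poly2 = poly.replace(" ","")
--
--
--     ## Checks for corner  cases of user mis-entry
--
--     signs = ["*","+","-","/"]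
--
--     for i in range(len(poly2)-1):
--         if poly2[i] in signs and poly2[i+1] in signs: # checks for e.g. +- / +*
--             return False
--         if poly2[i] in signs and poly2[i+1]=="^": # checks for e.g. +^, -^
--             return False
--         if poly2[i] == 'x' and poly2[i+1].isdigit(): #checks for x3 or x4
--             return False
--         if poly2[i] in ["*","/","^"] and poly2[i+1] == "x": #checks for *x or ^x
--             return False
--
--     return True
-- ===== SOURCE B (Python) =====
-- import re
--
-- _CHARS = re.compile(r'[ *+\-/x^0-9]*\Z')
-- _BAD = re.compile(r'[*+/-][*+/^-]|x[0-9]|[*/^]x')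
--
-- def checkPolynomial(poly):
--     """Regex-based: one whitelist fullmatch, then one search for forbidden adjacent pairs."""
--     if _CHARS.fullmatch(poly) is None:
--         return False
--     return _BAD.search(poly.replace(" ", "")) is None
-- ===== Notes on version B (the rewrite author's own statement) =====
-- stated objective: idiomatic
-- what changed: Replaces A's hand-written character loop and index-based adjacency loop with two regular expressions: a whitelist fullmatch over the input and a single search for the four forbidden adjacent-pair patterns on the space-stripped string.
import Mathlib
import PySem

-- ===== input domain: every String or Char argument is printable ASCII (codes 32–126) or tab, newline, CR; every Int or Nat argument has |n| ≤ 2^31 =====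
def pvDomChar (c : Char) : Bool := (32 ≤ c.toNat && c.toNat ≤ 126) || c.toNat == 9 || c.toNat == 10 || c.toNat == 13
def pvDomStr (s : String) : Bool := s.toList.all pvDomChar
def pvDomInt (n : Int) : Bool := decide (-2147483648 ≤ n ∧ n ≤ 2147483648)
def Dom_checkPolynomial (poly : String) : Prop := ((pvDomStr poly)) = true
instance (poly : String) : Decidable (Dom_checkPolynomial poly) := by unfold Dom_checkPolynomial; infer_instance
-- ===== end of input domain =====

-- B replaces A's two hand-written scans by regex matching (a whitelist fullmatch and one
-- search for the forbidden adjacent pairs); same result, idiomatic rather than faster.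

-- ===== PORT A =====
-- A's allowed-character list and sign list, verbatim.
def pvAllowedA : List Char := [' ', '*', '+', '-', '/', 'x', '^']
def pvSignsA : List Char := ['*', '+', '-', '/']

-- A's first loop: early return False on a char neither allowed nor a digit.
def pvLoop1A : List Char → Bool
  | [] => true
  | c :: rest =>
      if pvAllowedA.contains c || PySem.Chars.isdigit c then pvLoop1A rest
      else false

-- A's second loop over i in range(len(poly2)-1), looking at poly2[i], poly2[i+1].
def pvLoop2A : List Char → Bool
  | a :: b :: rest =>
      if pvSignsA.contains a && pvSignsA.contains b then false
      else if pvSignsA.contains a && b == '^' then false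
      else if a == 'x' && PySem.Chars.isdigit b then false
      else if (['*', '/', '^'] : List Char).contains a && b == 'x' then false
      else pvLoop2A (b :: rest)
  | _ => true

def checkPolynomial (poly : String) : Bool :=
  if pvLoop1A poly.toList then
    pvLoop2A (PySem.Str.replace poly " " "").toList
  else false

-- ===== PORT B =====
-- regex [ *+\-/x^0-9] as a character predicate
def pvClassB (c : Char) : Bool := " *+-/x^".toList.contains c || ('0' ≤ c && c ≤ '9')

-- regex [*+/-][*+/^-]|x[0-9]|[*/^]x matched at one position (two adjacent characters)
def pvBadPairB (a b : Char) : Bool :=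
  ("*+/-".toList.contains a && "*+/^-".toList.contains b)
    || (a == 'x' && ('0' ≤ b && b ≤ '9'))
    || ("*/^".toList.contains a && b == 'x')

def checkPolynomial_alt (poly : String) : Bool :=
  if poly.toList.all pvClassB then
    -- re.search over the stripped string: no adjacent pair matches the alternation
    let s := (PySem.Str.replace poly " " "").toList
    (s.zip s.tail).all fun p => ! pvBadPairB p.1 p.2
  else false

-- ===== PRECONDITION & SPEC =====
def Spec_checkPolynomial (poly : String) (out : Bool) : Prop := out = checkPolynomial_alt poly
instance (poly : String) (out : Bool) : Decidable (Spec_checkPolynomial poly out) := by unfold Spec_checkPolynomial; infer_instance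

-- ===== CLAIM (what is proved, stated in full; the proofs are below) =====
def Claim_equal_checkPolynomial : Prop := ∀ (poly : String), Dom_checkPolynomial poly → Spec_checkPolynomial poly (checkPolynomial poly)

-- ===== LEMMAS AND PROOFS =====

theorem pvChar_eq (c : Char) :
    (pvAllowedA.contains c || PySem.Chars.isdigit c) = pvClassB c := by
  simp [pvAllowedA, pvClassB, PySem.Chars.isdigit]

theorem pvLoop1_eq (cs : List Char) : pvLoop1A cs = cs.all pvClassB := by
  induction cs with
  | nil => rfl
  | cons c rest ih =>
      rw [List.all_cons, ← pvChar_eq c, ← ih]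
      simp only [pvLoop1A]
      cases h : (pvAllowedA.contains c || PySem.Chars.isdigit c) <;> simp

set_option maxHeartbeats 1600000 in
theorem pvPair_eq (a b : Char) :
    (pvSignsA.contains a && pvSignsA.contains b
      || pvSignsA.contains a && b == '^'
      || a == 'x' && PySem.Chars.isdigit b
      || (['*', '/', '^'] : List Char).contains a && b == 'x') = pvBadPairB a b := by
  rw [Bool.eq_iff_iff]

  simp [pvSignsA, pvBadPairB, PySem.Chars.isdigit]
  tauto

theorem pvLoop2_step (a b : Char) (rest : List Char) :
    pvLoop2A (a :: b :: rest) = ((! pvBadPairB a b) && pvLoop2A (b :: rest)) := by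
  rw [← pvPair_eq a b]
  simp only [pvLoop2A]
  cases h1 : (pvSignsA.contains a && pvSignsA.contains b) <;>
  cases h2 : (pvSignsA.contains a && b == '^') <;>
  cases h3 : (a == 'x' && PySem.Chars.isdigit b) <;>
  cases h4 : ((['*', '/', '^'] : List Char).contains a && b == 'x') <;>
    simp

theorem pvLoop2_eq (cs : List Char) :
    pvLoop2A cs = (cs.zip cs.tail).all fun p => ! pvBadPairB p.1 p.2 := by
  match cs with
  | [] => rfl
  | [a] => rfl
  | a :: b :: rest =>
      rw [pvLoop2_step a b rest, pvLoop2_eq (b :: rest)]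
      simp

-- ===== VERDICT (by name: the statement is the Claim_ definition above) =====
theorem checkPolynomial_spec : Claim_equal_checkPolynomial := by
  intro poly _
  unfold Spec_checkPolynomial checkPolynomial checkPolynomial_alt
  rw [pvLoop1_eq, pvLoop2_eq]
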